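-- pv_equiv track=rewrite | github.com/mdhikaf22/Tugas-Besar-Teori-Bahasa-dan-Automata | TubesTba.py | is_subject
-- ===== SOURCE A (Python) =====
-- def is_subject(word):
--     curr_state = 0
--     for letter in word:
--         if curr_state == 0:
--             if letter == 'a':
--                 curr_state = 1
--             elif letter == 'k':
--                 curr_state = 2
--             elif letter == 'd':
--                 curr_state = 3
--             elif letter == 'm':
--                 curr_state = 4
--             else:
--                 curr_state = -1
--         elif curr_state == 1:
--             if letter == 'k':
--                 curr_state = 5
--             else:
--                 curr_state = -1
--         elif curr_state == 2:
--             if letter == 'a':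
--                 curr_state = 6
--             elif letter == 'i':
--                 curr_state= 16
--             else:
--                 curr_state = -1
--         elif curr_state == 3:
--             if letter == 'i':
--                 curr_state = 7
--             else:
--                 curr_state = -1
--         elif curr_state == 4:
--             if letter == 'e':
--                 curr_state = 8
--             else:
--                 curr_state = -1
--         elif curr_state == 5:
--             if letter == 'u':
--                 curr_state = 9
--             else:
--                 curr_state = -1
--         elif curr_state == 6:
--             if letter == 'm':
--                 curr_state = 10
--             else:
--                 curr_state = -1
--         elif curr_state == 7:
--             if letter == 'a':
--                 curr_state = 11
--             else:
--                 curr_state = -1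
--         elif curr_state == 8:
--             if letter == 'r':
--                 curr_state = 12
--             else:
--                 curr_state = -1
--         elif curr_state == 9:
--             return True
--         elif curr_state == 10:
--             if letter == 'u':
--                 curr_state = 13
--             else:
--                 curr_state = -1
--         elif curr_state == 11:
--             return True
--         elif curr_state == 12:
--             if letter == 'e':
--                 curr_state = 14
--             else:
--                 curr_state = -1
--         elif curr_state == 13:
--             return True
--         elif curr_state == 14:
--             if letter == 'k':
--                 curr_state = 15
--             else:
--                 curr_state = -1
--         elif curr_state == 15:
--             if letter == 'a':
--                 curr_state = 19
--             else:
--                 curr_state= -1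
--             return True
--         elif curr_state == 16:
--             if letter == 't':
--                 curr_state = 17
--             else:
--                 curr_state = -1
--         elif curr_state == 17:
--             if letter == 'a':
--                 curr_state = 18
--             else:
--                 curr_state= -1
--         elif curr_state == 18:
--             return True
--         else:
--             curr_state = -1
--     return curr_state in [9, 11, 13, 19,18]
-- ===== SOURCE B (Python) =====
-- def is_subject(word):
--     return word.startswith(('aku', 'dia', 'kamu', 'kita')) or (
--         word.startswith('merek') and len(word) >= 6)
-- ===== Notes on version B (the rewrite author's own statement) =====
-- stated objective: simpler
-- what changed: Replaces the hand-written 20-state DFA loop with direct prefix tests: the language is just the prefixes 'aku','dia','kamu','kita' plus 'merek' followed by at least one more character (state 15 accepts any 6th letter).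
import Mathlib
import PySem

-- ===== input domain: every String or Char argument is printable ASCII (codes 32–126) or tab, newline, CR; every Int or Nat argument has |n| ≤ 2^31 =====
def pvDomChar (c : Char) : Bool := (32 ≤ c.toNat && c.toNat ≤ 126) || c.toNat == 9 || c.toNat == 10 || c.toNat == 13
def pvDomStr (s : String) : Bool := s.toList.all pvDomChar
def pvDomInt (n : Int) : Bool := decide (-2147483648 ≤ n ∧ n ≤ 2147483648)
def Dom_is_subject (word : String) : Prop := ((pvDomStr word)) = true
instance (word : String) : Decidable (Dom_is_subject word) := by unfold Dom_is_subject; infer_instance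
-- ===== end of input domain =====

-- B replaces the hand-written 20-state DFA loop by direct prefix tests (simpler; same results).

-- ===== PORT A =====
-- the loop of A: state × remaining letters; early 'return True' becomes returning true,
-- the final 'curr_state in [9, 11, 13, 19, 18]' is the [] case
def isSubjectRun : Int → List Char → Bool
  | s, [] => s = 9 || s = 11 || s = 13 || s = 19 || s = 18
  | s, c :: rest =>
    if s = 0 then
      isSubjectRun (if c = 'a' then 1 else if c = 'k' then 2 else if c = 'd' then 3
                    else if c = 'm' then 4 else -1) rest
    else if s = 1 then isSubjectRun (if c = 'k' then 5 else -1) rest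
    else if s = 2 then isSubjectRun (if c = 'a' then 6 else if c = 'i' then 16 else -1) rest
    else if s = 3 then isSubjectRun (if c = 'i' then 7 else -1) rest
    else if s = 4 then isSubjectRun (if c = 'e' then 8 else -1) rest
    else if s = 5 then isSubjectRun (if c = 'u' then 9 else -1) rest
    else if s = 6 then isSubjectRun (if c = 'm' then 10 else -1) rest
    else if s = 7 then isSubjectRun (if c = 'a' then 11 else -1) rest
    else if s = 8 then isSubjectRun (if c = 'r' then 12 else -1) rest
    else if s = 9 then true
    else if s = 10 then isSubjectRun (if c = 'u' then 13 else -1) rest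
    else if s = 11 then true
    else if s = 12 then isSubjectRun (if c = 'e' then 14 else -1) rest
    else if s = 13 then true
    else if s = 14 then isSubjectRun (if c = 'k' then 15 else -1) rest
    else if s = 15 then true   -- Python sets curr_state then returns True regardless
    else if s = 16 then isSubjectRun (if c = 't' then 17 else -1) rest
    else if s = 17 then isSubjectRun (if c = 'a' then 18 else -1) rest
    else if s = 18 then true
    else isSubjectRun (-1) rest

def is_subject (word : String) : Bool := isSubjectRun 0 word.toList

-- ===== PORT B =====
def is_subject_alt (word : String) : Bool :=
  (PySem.Str.startswith word "aku" || PySem.Str.startswith word "dia" ||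
   PySem.Str.startswith word "kamu" || PySem.Str.startswith word "kita") ||
  (PySem.Str.startswith word "merek" && decide (6 ≤ PySem.Str.len word))

-- ===== PRECONDITION & SPEC =====
def Spec_is_subject (word : String) (out : Bool) : Prop := out = is_subject_alt word
instance (word : String) (out : Bool) : Decidable (Spec_is_subject word out) := by unfold Spec_is_subject; infer_instance

-- ===== CLAIM (what is proved, stated in full; the proofs are below) =====
def Claim_equal_is_subject : Prop := ∀ (word : String), Dom_is_subject word → Spec_is_subject word (is_subject word)

-- ===== LEMMAS AND PROOFS =====

theorem run_dead (l : List Char) : isSubjectRun (-1) l = false := by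
  induction l with
  | nil => rfl
  | cons c r ih => simpa [isSubjectRun] using ih

theorem run_acc9 (l : List Char) : isSubjectRun 9 l = true := by cases l <;> rfl
theorem run_acc11 (l : List Char) : isSubjectRun 11 l = true := by cases l <;> rfl
theorem run_acc13 (l : List Char) : isSubjectRun 13 l = true := by cases l <;> rfl
theorem run_acc18 (l : List Char) : isSubjectRun 18 l = true := by cases l <;> rfl

theorem run_s15 (l : List Char) : isSubjectRun 15 l = decide (1 ≤ l.length) := by
  cases l with
  | nil => decide
  | cons c r => simp [isSubjectRun]

theorem run5 (l : List Char) : isSubjectRun 5 l = decide (['u'] <+: l) := by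
  cases l with
  | nil => rfl
  | cons c r =>
    by_cases h : c = 'u'
    · simp [isSubjectRun, h, List.cons_prefix_cons, run_acc9]
    · simp [isSubjectRun, h, Ne.symm h, run_dead, List.cons_prefix_cons]

theorem run1 (l : List Char) : isSubjectRun 1 l = decide (['k','u'] <+: l) := by
  cases l with
  | nil => rfl
  | cons c r =>
    by_cases h : c = 'k'
    · simp [isSubjectRun, h, List.cons_prefix_cons, run5]
    · simp [isSubjectRun, h, Ne.symm h, run_dead, List.cons_prefix_cons]

theorem run7 (l : List Char) : isSubjectRun 7 l = decide (['a'] <+: l) := by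
  cases l with
  | nil => rfl
  | cons c r =>
    by_cases h : c = 'a'
    · simp [isSubjectRun, h, List.cons_prefix_cons, run_acc11]
    · simp [isSubjectRun, h, Ne.symm h, run_dead, List.cons_prefix_cons]

theorem run3 (l : List Char) : isSubjectRun 3 l = decide (['i','a'] <+: l) := by
  cases l with
  | nil => rfl
  | cons c r =>
    by_cases h : c = 'i'
    · simp [isSubjectRun, h, List.cons_prefix_cons, run7]
    · simp [isSubjectRun, h, Ne.symm h, run_dead, List.cons_prefix_cons]

theorem run10 (l : List Char) : isSubjectRun 10 l = decide (['u'] <+: l) := by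
  cases l with
  | nil => rfl
  | cons c r =>
    by_cases h : c = 'u'
    · simp [isSubjectRun, h, List.cons_prefix_cons, run_acc13]
    · simp [isSubjectRun, h, Ne.symm h, run_dead, List.cons_prefix_cons]

theorem run6 (l : List Char) : isSubjectRun 6 l = decide (['m','u'] <+: l) := by
  cases l with
  | nil => rfl
  | cons c r =>
    by_cases h : c = 'm'
    · simp [isSubjectRun, h, List.cons_prefix_cons, run10]
    · simp [isSubjectRun, h, Ne.symm h, run_dead, List.cons_prefix_cons]

theorem run17 (l : List Char) : isSubjectRun 17 l = decide (['a'] <+: l) := by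
  cases l with
  | nil => rfl
  | cons c r =>
    by_cases h : c = 'a'
    · simp [isSubjectRun, h, List.cons_prefix_cons, run_acc18]
    · simp [isSubjectRun, h, Ne.symm h, run_dead, List.cons_prefix_cons]

theorem run16 (l : List Char) : isSubjectRun 16 l = decide (['t','a'] <+: l) := by
  cases l with
  | nil => rfl
  | cons c r =>
    by_cases h : c = 't'
    · simp [isSubjectRun, h, List.cons_prefix_cons, run17]
    · simp [isSubjectRun, h, Ne.symm h, run_dead, List.cons_prefix_cons]

theorem run14 (l : List Char) : isSubjectRun 14 l = decide (['k'] <+: l ∧ 2 ≤ l.length) := by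
  cases l with
  | nil => rfl
  | cons c r =>
    by_cases h : c = 'k'
    · have step : isSubjectRun 14 (c :: r) = isSubjectRun 15 r := by simp [isSubjectRun, h]
      rw [step, run_s15, decide_eq_decide]
      subst h
      simp only [List.cons_prefix_cons, List.length_cons, true_and, List.nil_prefix]
      omega
    · simp [isSubjectRun, h, Ne.symm h, run_dead, List.cons_prefix_cons]

theorem run12 (l : List Char) : isSubjectRun 12 l = decide (['e','k'] <+: l ∧ 3 ≤ l.length) := by
  cases l with
  | nil => rfl
  | cons c r =>
    by_cases h : c = 'e'
    · have step : isSubjectRun 12 (c :: r) = isSubjectRun 14 r := by simp [isSubjectRun, h]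
      rw [step, run14, decide_eq_decide]
      subst h
      simp only [List.cons_prefix_cons, List.length_cons, true_and]
      constructor
      · rintro ⟨h1, h2⟩; exact ⟨h1, by omega⟩
      · rintro ⟨h1, h2⟩; exact ⟨h1, by omega⟩
    · simp [isSubjectRun, h, Ne.symm h, run_dead, List.cons_prefix_cons]

theorem run8 (l : List Char) : isSubjectRun 8 l = decide (['r','e','k'] <+: l ∧ 4 ≤ l.length) := by
  cases l with
  | nil => rfl
  | cons c r =>
    by_cases h : c = 'r'
    · have step : isSubjectRun 8 (c :: r) = isSubjectRun 12 r := by simp [isSubjectRun, h]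
      rw [step, run12, decide_eq_decide]
      subst h
      simp only [List.cons_prefix_cons, List.length_cons, true_and]
      constructor
      · rintro ⟨h1, h2⟩; exact ⟨h1, by omega⟩
      · rintro ⟨h1, h2⟩; exact ⟨h1, by omega⟩
    · simp [isSubjectRun, h, Ne.symm h, run_dead, List.cons_prefix_cons]

theorem run4 (l : List Char) : isSubjectRun 4 l = decide (['e','r','e','k'] <+: l ∧ 5 ≤ l.length) := by
  cases l with
  | nil => rfl
  | cons c r =>
    by_cases h : c = 'e'
    · have step : isSubjectRun 4 (c :: r) = isSubjectRun 8 r := by simp [isSubjectRun, h]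
      rw [step, run8, decide_eq_decide]
      subst h
      simp only [List.cons_prefix_cons, List.length_cons, true_and]
      constructor
      · rintro ⟨h1, h2⟩; exact ⟨h1, by omega⟩
      · rintro ⟨h1, h2⟩; exact ⟨h1, by omega⟩
    · simp [isSubjectRun, h, Ne.symm h, run_dead, List.cons_prefix_cons]

theorem run2 (l : List Char) :
    isSubjectRun 2 l = (decide (['a','m','u'] <+: l) || decide (['i','t','a'] <+: l)) := by
  cases l with
  | nil => rfl
  | cons c r =>
    by_cases ha : c = 'a'
    · simp [isSubjectRun, ha, List.cons_prefix_cons, run6]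
    · by_cases hi : c = 'i'
      · simp [isSubjectRun, hi, List.cons_prefix_cons, run16]
      · simp [isSubjectRun, ha, hi, Ne.symm ha, Ne.symm hi, List.cons_prefix_cons, run_dead]

theorem run_key (l : List Char) :
    isSubjectRun 0 l =
      (decide ("aku".toList <+: l) || decide ("dia".toList <+: l) ||
       decide ("kamu".toList <+: l) || decide ("kita".toList <+: l) ||
       (decide ("merek".toList <+: l) && decide (6 ≤ l.length))) := by
  cases l with
  | nil => rfl
  | cons c r =>
    by_cases ha : c = 'a'
    · simp [isSubjectRun, ha, List.cons_prefix_cons, run1]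
    · by_cases hk : c = 'k'
      · simp [isSubjectRun, hk, List.cons_prefix_cons, run2]
      · by_cases hd : c = 'd'
        · simp [isSubjectRun, hd, List.cons_prefix_cons, run3]
        · by_cases hm : c = 'm'
          · have step : isSubjectRun 0 (c :: r) = isSubjectRun 4 r := by
              simp [isSubjectRun, hm]
            rw [step, run4, Bool.eq_iff_iff]
            subst hm
            simp [List.cons_prefix_cons, Ne.symm ha, Ne.symm hk, Ne.symm hd]
          · simp [isSubjectRun, ha, hk, hd, hm, Ne.symm ha, Ne.symm hk, Ne.symm hd,
              Ne.symm hm, List.cons_prefix_cons, run_dead]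

theorem sw_eq (s p : List Char) : PySem.Chars.startswith s p = decide (p <+: s) := by
  by_cases h : p <+: s
  · simp [PySem.Chars.startswith_iff, h]
  · simp only [h, decide_false]
    exact Bool.eq_false_iff.mpr (fun hh => h ((PySem.Chars.startswith_iff _ _).mp hh))


-- ===== VERDICT (by name: the statement is the Claim_ definition above) =====
theorem is_subject_spec : Claim_equal_is_subject := by
  intro word _
  unfold Spec_is_subject is_subject is_subject_alt
  rw [run_key word.toList]
  have hc : decide (6 ≤ word.toList.length) = decide (6 ≤ PySem.Str.len word) := by
    rw [decide_eq_decide]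
    simp only [PySem.Str.len_eq]
    omega
  simp only [PySem.Str.startswith_eq, sw_eq, hc, Bool.or_assoc]
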